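-- pv_equiv track=rewrite | github.com/pypi-data/pypi-mirror-400 | packages/geomatica/geomatica-1.3.3-py3-none-any.whl/geomatica/__init__.py | _merge_sort_parity
-- ===== SOURCE A (Python) =====
-- def _merge_sort_parity(arr):
--  if len(arr) <= 1 : return arr, 1
--  mid = len(arr) // 2
--  left, p_left = _merge_sort_parity(arr[:mid])
--  right, p_right = _merge_sort_parity(arr[mid:])
--  merged = []
--  parity = p_left * p_right
--  i = j = 0
--  while i < len(left) and j < len(right):
--   if left[i] <= right[j]:
--    merged.append(left[i])
--    i += 1
--    continue
--   merged.append(right[j])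
--   j += 1
--   if (len(left) - i) & 1: parity = -parity
--  merged.extend(left[i:])
--  merged.extend(right[j:])
--  return merged, parity
-- ===== SOURCE B (Python) =====
-- def _merge_sort_parity(arr):
--     # One-pass insertion sort that counts inversions online: each new element
--     # is inserted into the sorted prefix; the elements it passes are exactly
--     # its inversions with earlier elements.  Parity = (-1)^inversions.
--     out = []
--     inv = 0
--     for x in arr:
--         j = len(out)
--         while j > 0 and out[j - 1] > x:
--             j -= 1
--         inv += len(out) - j
--         out.insert(j, x)
--     return out, 1 if inv % 2 == 0 else -1
-- ===== Notes on version B (the rewrite author's own statement) =====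
-- stated objective: alternative
-- what changed: Replaces the recursive merge sort with merge-time parity flips by a single-pass insertion sort that counts each element's inversions against the already-sorted prefix while inserting it; parity is (-1)^inversions.
import Mathlib
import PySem

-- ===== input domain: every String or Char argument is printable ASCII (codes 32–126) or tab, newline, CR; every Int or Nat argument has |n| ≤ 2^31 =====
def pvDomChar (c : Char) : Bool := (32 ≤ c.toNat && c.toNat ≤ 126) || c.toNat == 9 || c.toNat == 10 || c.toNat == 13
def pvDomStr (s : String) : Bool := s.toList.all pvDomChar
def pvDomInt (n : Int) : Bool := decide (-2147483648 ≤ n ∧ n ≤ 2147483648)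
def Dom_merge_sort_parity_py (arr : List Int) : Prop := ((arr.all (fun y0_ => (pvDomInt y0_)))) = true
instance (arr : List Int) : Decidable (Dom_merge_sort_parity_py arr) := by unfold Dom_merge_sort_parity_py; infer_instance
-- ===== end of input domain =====

-- B replaces A's recursive merge sort (with merge-time parity flips) by a single-pass
-- insertion sort that counts each new element's inversions against the sorted prefix
-- (objective: alternative algorithm, adaptive O(n + inversions); not claimed faster).

-- ===== PORT A =====
-- the merge loop of A: walks `left`/`right` as A walks indices i/j; `(len(left)-i) & 1`
-- is the parity of the remaining-left length (a nonnegative int, so & 1 is % 2)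
def pvMergeA : List Int → List Int → Int → List Int × Int
  | [], r, p => (r, p)            -- merged.extend(right[j:])
  | a :: l, [], p => (a :: l, p)  -- merged.extend(left[i:])
  | a :: l, b :: r, p =>
    if a ≤ b then
      let m := pvMergeA l (b :: r) p
      (a :: m.1, m.2)
    else
      let p' := if (l.length + 1) % 2 = 1 then -p else p
      let m := pvMergeA (a :: l) r p'
      (b :: m.1, m.2)

-- arr[:mid] / arr[mid:] with mid = len(arr)//2 (0 ≤ mid ≤ len) are exactly take/drop
def merge_sort_parity_py (arr : List Int) : List Int × Int :=
  if _h : arr.length ≤ 1 then (arr, 1)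
  else
    let mid := arr.length / 2
    let L := merge_sort_parity_py (arr.take mid)
    let R := merge_sort_parity_py (arr.drop mid)
    pvMergeA L.1 R.1 (L.2 * R.2)
termination_by arr.length
decreasing_by
  · simp only [List.length_take]; omega
  · simp only [List.length_drop]; omega

-- ===== PORT B =====
-- Source B's inner `while j > 0 and out[j-1] > x: j -= 1`, recursion on j
-- (out[j-1] is always in range; ported with getD, equal to Python indexing here)
def pvFindPos (out : List Int) (x : Int) : Nat → Nat
  | 0 => 0
  | j + 1 => if out.getD j 0 > x then pvFindPos out x j else j + 1

def merge_sort_parity_py_alt (arr : List Int) : List Int × Int :=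
  let st := arr.foldl (fun (st : List Int × Int) x =>
    let out := st.1
    let j := pvFindPos out x out.length
    (PySem.List.insert out (j : Int) x, st.2 + ((out.length : Int) - (j : Int)))) ([], 0)
  (st.1, if PySem.Int.mod st.2 2 = 0 then 1 else -1)

-- ===== PRECONDITION & SPEC =====
def Spec_merge_sort_parity_py (arr : List Int) (out : List Int × Int) : Prop := out = merge_sort_parity_py_alt arr
instance (arr : List Int) (out : List Int × Int) : Decidable (Spec_merge_sort_parity_py arr out) := by unfold Spec_merge_sort_parity_py; infer_instance

-- ===== CLAIM (what is proved, stated in full; the proofs are below) =====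
def Claim_equal_merge_sort_parity_py : Prop := ∀ (arr : List Int), Dom_merge_sort_parity_py arr → Spec_merge_sort_parity_py arr (merge_sort_parity_py arr)

-- ===== LEMMAS AND PROOFS =====

def pvInv : List Int → Nat
  | [] => 0
  | x :: l => l.countP (fun y => decide (y < x)) + pvInv l

def pvCross (s l : List Int) : Nat := (l.map (fun x => s.countP (fun y => decide (x < y)))).sum

def pvSgn (n : Nat) : Int := if n % 2 = 0 then 1 else -1

theorem pvSgn_add (m n : Nat) : pvSgn (m + n) = pvSgn m * pvSgn n := by
  unfold pvSgn; split_ifs <;> omega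

theorem pvCross_cons_right (s : List Int) (x : Int) (l : List Int) :
    pvCross s (x :: l) = s.countP (fun y => decide (x < y)) + pvCross s l := rfl

theorem pvCross_nil_left (l : List Int) : pvCross [] l = 0 := by
  induction l with
  | nil => rfl
  | cons x l ih => simp [pvCross_cons_right, ih]

theorem pvCross_nil_right (s : List Int) : pvCross s [] = 0 := rfl

theorem pvCross_perm_left {s s' : List Int} (h : s.Perm s') (l : List Int) :
    pvCross s l = pvCross s' l := by
  unfold pvCross
  congr 1
  exact List.map_congr_left (fun x _ => h.countP_eq _)

theorem pvCross_perm_right (s : List Int) {l l' : List Int} (h : l.Perm l') :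
    pvCross s l = pvCross s l' := (h.map _).sum_eq

theorem pvCross_cons_left (y : Int) (s l : List Int) :
    pvCross (y :: s) l = l.countP (fun z => decide (z < y)) + pvCross s l := by
  induction l with
  | nil => simp [pvCross_nil_right]
  | cons x l ih =>
    simp only [pvCross_cons_right, ih, List.countP_cons]
    by_cases h : x < y <;> simp [h] <;> omega

theorem pvCross_append_singleton_left (s : List Int) (x : Int) (l : List Int) :
    pvCross (s ++ [x]) l = pvCross s l + l.countP (fun z => decide (z < x)) := by
  rw [pvCross_perm_left (List.perm_append_singleton x s) l, pvCross_cons_left]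
  omega

theorem pvInv_append (u v : List Int) : pvInv (u ++ v) = pvInv u + pvInv v + pvCross u v := by
  induction u with
  | nil => simp [pvInv, pvCross_nil_left]
  | cons y u ih =>
    simp only [List.cons_append, pvInv, ih, List.countP_append, pvCross_cons_left]
    omega

theorem pvMergeA_spec : ∀ (l r : List Int) (p : Int), l.Pairwise (· ≤ ·) → r.Pairwise (· ≤ ·) →
    (pvMergeA l r p).1.Perm (l ++ r) ∧ (pvMergeA l r p).1.Pairwise (· ≤ ·) ∧
      (pvMergeA l r p).2 = p * pvSgn (pvCross l r) := by
  intro l r p hl hr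
  induction l, r, p using pvMergeA.induct with
  | case1 r p =>
    simp [pvMergeA, hr, pvCross_nil_left, pvSgn]
  | case2 a l p =>
    simp [pvMergeA, hl, pvCross_nil_right, pvSgn]
  | case3 a l b r p hab ih =>
    have hl' := hl.tail
    obtain ⟨ihp, ihs, ihv⟩ := ih hl' hr
    have hla : ∀ y ∈ l, a ≤ y := fun y hy => List.rel_of_pairwise_cons hl hy
    have hrb : ∀ y ∈ r, b ≤ y := fun y hy => List.rel_of_pairwise_cons hr hy
    refine ⟨?_, ?_, ?_⟩
    · simpa [pvMergeA, hab] using ihp.cons a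
    · simp only [pvMergeA, hab, if_pos]
      refine List.Pairwise.cons ?_ ihs
      intro y hy
      rcases List.mem_append.mp (ihp.mem_iff.mp hy) with h | h
      · exact hla y h
      · rcases List.mem_cons.mp h with rfl | h
        · exact hab
        · exact le_trans hab (hrb y h)
    · simp only [pvMergeA, hab, if_pos]
      rw [ihv]
      congr 2
      rw [pvCross_cons_left]
      have : List.countP (fun z => decide (z < a)) (b :: r) = 0 := by
        rw [List.countP_eq_zero]
        intro z hz
        rcases List.mem_cons.mp hz with rfl | h
        · simp; omega
        · have := hrb z h; simp; omega
      omega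
  | case4 a l b r p hab p' ih =>
    have hr' := hr.tail
    obtain ⟨ihp, ihs, ihv⟩ := ih hl hr'
    have hla : ∀ y ∈ l, a ≤ y := fun y hy => List.rel_of_pairwise_cons hl hy
    have hrb : ∀ y ∈ r, b ≤ y := fun y hy => List.rel_of_pairwise_cons hr hy
    have hba : b < a := by omega
    refine ⟨?_, ?_, ?_⟩
    · simp only [pvMergeA, hab, if_false]
      exact (ihp.cons b).trans (List.perm_middle.symm)
    · simp only [pvMergeA, hab, if_false]
      refine List.Pairwise.cons ?_ ihs
      intro y hy
      rcases List.mem_append.mp (ihp.mem_iff.mp hy) with h | h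
      · rcases List.mem_cons.mp h with rfl | h
        · omega
        · have := hla y h; omega
      · exact hrb y h
    · simp only [pvMergeA, hab, if_false]
      rw [show (if (l.length + 1) % 2 = 1 then -p else p) = p' from rfl, ihv]
      have hcnt : List.countP (fun z => decide (b < z)) (a :: l) = l.length + 1 := by
        rw [List.countP_eq_length.mpr]
        · simp
        · intro z hz
          rcases List.mem_cons.mp hz with rfl | h
          · simp; omega
          · have := hla z h; simp; omega
      rw [pvCross_cons_right, hcnt, pvSgn_add]
      rw [show p' = if (l.length + 1) % 2 = 1 then -p else p from rfl]
      by_cases hm : (l.length + 1) % 2 = 1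
      · rw [if_pos hm]
        unfold pvSgn
        rw [if_neg (by omega : ¬ (l.length + 1) % 2 = 0)]
        ring
      · rw [if_neg hm]
        unfold pvSgn
        rw [if_pos (by omega : (l.length + 1) % 2 = 0)]
        ring

theorem pvA_char (arr : List Int) :
    (merge_sort_parity_py arr).1.Perm arr ∧ (merge_sort_parity_py arr).1.Pairwise (· ≤ ·) ∧
      (merge_sort_parity_py arr).2 = pvSgn (pvInv arr) := by
  induction arr using merge_sort_parity_py.induct with
  | case1 arr h =>
    rw [merge_sort_parity_py, dif_pos h]
    rcases arr with _ | ⟨x, _ | ⟨y, t⟩⟩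
    · simp [pvInv, pvSgn]
    · simp [pvInv, pvSgn]
    · simp at h
  | case2 arr h mid ih1 ih2 =>
    rw [merge_sort_parity_py, dif_neg h]
    obtain ⟨p1, s1, v1⟩ := ih1
    obtain ⟨p2, s2, v2⟩ := ih2
    obtain ⟨mp, ms, mv⟩ := pvMergeA_spec (merge_sort_parity_py (arr.take mid)).1
      (merge_sort_parity_py (arr.drop mid)).1
      ((merge_sort_parity_py (arr.take mid)).2 *
        (merge_sort_parity_py (arr.drop mid)).2) s1 s2
    refine ⟨mp.trans ((p1.append p2).trans (by rw [List.take_append_drop])), ms, ?_⟩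
    rw [mv, v1, v2,
      pvCross_perm_left p1 _, pvCross_perm_right _ p2,
      ← pvSgn_add, ← pvSgn_add, ← pvInv_append, List.take_append_drop]

theorem pvFindPos_append (ys t : List Int) (x : Int) :
    ∀ j, j ≤ ys.length → pvFindPos (ys ++ t) x j = pvFindPos ys x j := by
  intro j
  induction j with
  | zero => intro _; rfl
  | succ j ih =>
    intro hj
    have hg : (ys ++ t).getD j 0 = ys.getD j 0 := by
      simp [List.getD, List.getElem?_append_left (by omega : j < ys.length)]
    simp only [pvFindPos, hg]
    split_ifs with h
    · exact ih (by omega)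
    · rfl

theorem pvFindPos_sorted (out : List Int) (x : Int) (hs : out.Pairwise (· ≤ ·)) :
    pvFindPos out x out.length = out.length - out.countP (fun y => decide (x < y)) := by
  induction out using List.reverseRecOn with
  | nil => rfl
  | append_singleton ys a ih =>
    have hys : ys.Pairwise (· ≤ ·) := hs.sublist (List.sublist_append_left ys [a])
    have hlen : (ys ++ [a]).length = ys.length + 1 := by simp
    have hga : (ys ++ [a]).getD ys.length 0 = a := by
      simp [List.getD]
    have hk := List.countP_le_length (p := fun y => decide (x < y)) (l := ys)
    rw [hlen]
    simp only [pvFindPos, hga]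
    split_ifs with h
    · rw [pvFindPos_append ys [a] x ys.length le_rfl, ih hys]
      simp only [List.countP_append, List.countP_cons, List.countP_nil]
      simp only [decide_eq_true_eq]
      rw [if_pos h]
      omega
    · have hya : ∀ y ∈ ys, y ≤ a := by
        intro y hy
        exact (List.pairwise_append.mp hs).2.2 y hy a (by simp)
      have h0 : ys.countP (fun y => decide (x < y)) = 0 := by
        rw [List.countP_eq_zero]
        intro y hy
        have := hya y hy
        simp; omega
      simp only [List.countP_append, List.countP_cons, List.countP_nil, h0]
      simp only [decide_eq_true_eq]
      rw [if_neg h]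
      omega

theorem pvTakeDrop (out : List Int) (x : Int) (hs : out.Pairwise (· ≤ ·)) :
    (∀ y ∈ out.take (out.length - out.countP (fun y => decide (x < y))), ¬ x < y) ∧
    (∀ y ∈ out.drop (out.length - out.countP (fun y => decide (x < y))), x < y) := by
  induction out using List.reverseRecOn with
  | nil => simp
  | append_singleton ys a ih =>
    have hys : ys.Pairwise (· ≤ ·) := hs.sublist (List.sublist_append_left ys [a])
    have hya : ∀ y ∈ ys, y ≤ a := by
      intro y hy
      exact (List.pairwise_append.mp hs).2.2 y hy a (by simp)
    have hk := List.countP_le_length (p := fun y => decide (x < y)) (l := ys)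
    obtain ⟨ih1, ih2⟩ := ih hys
    by_cases h : x < a
    · have hc : (ys ++ [a]).countP (fun y => decide (x < y)) =
          ys.countP (fun y => decide (x < y)) + 1 := by
        simp [List.countP_append, h]
      rw [hc]
      have hm : (ys ++ [a]).length - (ys.countP (fun y => decide (x < y)) + 1) =
          ys.length - ys.countP (fun y => decide (x < y)) := by simp
      rw [hm]
      constructor
      · intro y hy
        rw [List.take_append_of_le_length (by omega)] at hy
        exact ih1 y hy
      · intro y hy
        rw [List.drop_append_of_le_length (by omega)] at hy
        rcases List.mem_append.mp hy with h' | h'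
        · exact ih2 y h'
        · rcases List.mem_singleton.mp h' with rfl; exact h
    · have h0 : (ys ++ [a]).countP (fun y => decide (x < y)) = 0 := by
        rw [List.countP_eq_zero]
        intro y hy
        rcases List.mem_append.mp hy with h' | h'
        · have := hya y h'; simp; omega
        · rcases List.mem_singleton.mp h' with rfl; simp; omega
      rw [h0]
      constructor
      · intro y hy
        simp only [Nat.sub_zero, List.take_length] at hy
        rcases List.mem_append.mp hy with h' | h'
        · have := hya y h'; omega
        · rcases List.mem_singleton.mp h' with rfl; omega
      · intro y hy
        simp only [Nat.sub_zero, List.drop_length] at hy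
        exact absurd hy (List.not_mem_nil)

theorem pvB_fold : ∀ (rest out : List Int) (inv : Int), out.Pairwise (· ≤ ·) →
    (let r := rest.foldl (fun (st : List Int × Int) x =>
        let out := st.1
        let j := pvFindPos out x out.length
        (PySem.List.insert out (j : Int) x, st.2 + ((out.length : Int) - (j : Int)))) (out, inv)
     r.1.Pairwise (· ≤ ·) ∧ r.1.Perm (out ++ rest) ∧
       r.2 = inv + ((pvCross out rest + pvInv rest : Nat) : Int)) := by
  intro rest
  induction rest with
  | nil =>
    intro out inv hs
    refine ⟨hs, by simp, ?_⟩
    simp [pvCross_nil_right, pvInv]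
  | cons x rest ih =>
    intro out inv hs
    have hk := List.countP_le_length (p := fun y => decide (x < y)) (l := out)
    have hj : pvFindPos out x out.length = out.length - out.countP (fun y => decide (x < y)) :=
      pvFindPos_sorted out x hs
    obtain ⟨hT, hD⟩ := pvTakeDrop out x hs
    set k := out.countP (fun y => decide (x < y)) with hkdef
    set j := out.length - k with hjdef
    have hjle : j ≤ out.length := by omega
    have hins : PySem.List.insert out ((pvFindPos out x out.length : Nat) : Int) x =
        out.take j ++ x :: out.drop j := by
      rw [hj]
      exact PySem.List.insert_natCast out j x hjle
    have hsort' : (out.take j ++ x :: out.drop j).Pairwise (· ≤ ·) := by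
      rw [List.pairwise_append]
      refine ⟨hs.sublist (List.take_sublist j out), ?_, ?_⟩
      · refine List.Pairwise.cons ?_ (hs.sublist (List.drop_sublist j out))
        intro y hy
        exact le_of_lt (hD y hy)
      · intro a ha b hb
        have ha' : a ≤ x := by have := hT a ha; omega
        rcases List.mem_cons.mp hb with rfl | hb'
        · exact ha'
        · exact le_trans ha' (le_of_lt (hD b hb'))
    have hperm' : (out.take j ++ x :: out.drop j).Perm (out ++ [x]) := by
      refine List.perm_middle.trans ?_
      rw [List.take_append_drop]
      exact (List.perm_append_singleton x out).symm
    have hval : ((out.length : Int) - ((pvFindPos out x out.length : Nat) : Int)) = (k : Int) := by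
      rw [hj]; omega
    simp only [List.foldl_cons]
    have := ih (out.take j ++ x :: out.drop j) (inv + ((out.length : Int) - ((pvFindPos out x out.length : Nat) : Int))) hsort'
    simp only at this ⊢
    rw [hins]
    obtain ⟨c1, c2, c3⟩ := this
    refine ⟨c1, ?_, ?_⟩
    · refine c2.trans ?_
      refine (hperm'.append_right rest).trans ?_
      have : (out ++ [x]) ++ rest = out ++ x :: rest := by simp
      rw [this]
    · rw [c3, hval]
      rw [pvCross_perm_left hperm' rest, pvCross_append_singleton_left,
        pvCross_cons_right, ← hkdef]
      have : pvInv (x :: rest) = rest.countP (fun y => decide (y < x)) + pvInv rest := rfl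
      rw [this]
      push_cast
      ring

theorem pvMain (arr : List Int) : merge_sort_parity_py arr = merge_sort_parity_py_alt arr := by
  obtain ⟨ap, as, av⟩ := pvA_char arr
  have hB := pvB_fold arr [] 0 List.Pairwise.nil
  simp only at hB
  obtain ⟨bs, bp, bv⟩ := hB
  rw [List.nil_append] at bp
  rw [pvCross_nil_left] at bv
  unfold merge_sort_parity_py_alt
  simp only
  refine Prod.ext ?_ ?_
  · exact (ap.trans bp.symm).eq_of_pairwise (by intro a b _ _ hab hba; omega) as bs
  · rw [av, bv, PySem.Int.mod_eq_emod_of_pos (by norm_num)]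
    unfold pvSgn
    by_cases h : pvInv arr % 2 = 0
    · rw [if_pos h, if_pos (by push_cast; omega)]
    · rw [if_neg h, if_neg (by push_cast; omega)]

-- ===== VERDICT (by name: the statement is the Claim_ definition above) =====
theorem merge_sort_parity_py_spec : Claim_equal_merge_sort_parity_py := by
  intro arr _
  unfold Spec_merge_sort_parity_py
  exact pvMain arr
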